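-- pv_equiv track=rewrite | github.com/nathan237/TrustOS | apple/tools/checkm8-dualboot/rom_diff.py | find_code_region
-- ===== SOURCE A (Python) =====
-- def find_code_region(data):
--     """Find the actual code region (non-zero, non-padding)."""
--     # Find first non-zero byte
--     first_nonzero = 0
--     for i in range(len(data)):
--         if data[i] != 0:
--             first_nonzero = i
--             break
--
--     # Find last non-zero byte
--     last_nonzero = len(data) - 1
--     while last_nonzero > 0 and data[last_nonzero] == 0:
--         last_nonzero -= 1
--
--     return first_nonzero, last_nonzero + 1
-- ===== SOURCE B (Python) =====
-- def find_code_region(data):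
--     """Find the actual code region (non-zero, non-padding)."""
--     if not data:
--         return 0, 0
--     first = 0
--     seen = False
--     last = 0
--     for i, b in enumerate(data):
--         if b != 0 and not seen:
--             first = i
--             seen = True
--         if b != 0:
--             last = i
--     return first, last + 1
-- ===== Notes on version B (the rewrite author's own statement) =====
-- stated objective: alternative
-- what changed: A's two separate scans (a forward for-loop with break for the first non-zero index and a backward while-loop for the last) are fused into a single forward pass that tracks both the first and the last non-zero index, with only the empty input special-cased.
import Mathlib
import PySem

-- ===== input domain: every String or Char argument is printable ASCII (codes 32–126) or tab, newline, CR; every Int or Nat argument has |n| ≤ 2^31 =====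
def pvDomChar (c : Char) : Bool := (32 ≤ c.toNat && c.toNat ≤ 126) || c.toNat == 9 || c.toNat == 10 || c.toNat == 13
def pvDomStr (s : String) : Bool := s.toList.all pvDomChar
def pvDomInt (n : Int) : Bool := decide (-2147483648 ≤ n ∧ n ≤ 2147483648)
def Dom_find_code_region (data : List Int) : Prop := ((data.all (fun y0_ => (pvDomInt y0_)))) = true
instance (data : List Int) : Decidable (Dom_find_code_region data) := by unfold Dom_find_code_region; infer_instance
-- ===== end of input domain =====

-- B replaces A's two scans (forward for-loop with break, backward while-loop) by one forward
-- pass tracking the first and last non-zero index; same return value (alternative decomposition).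

-- ===== PORT A =====
-- for i in range(len(data)): if data[i] != 0: first_nonzero = i; break   (default 0)
def findFirstA (l : List Int) (i : Int) : Int :=
  match l with
  | [] => 0
  | x :: xs => if x ≠ 0 then i else findFirstA xs (i + 1)

-- while last_nonzero > 0 and data[last_nonzero] == 0: last_nonzero -= 1
def findLastA (data : List Int) (last : Int) : Int :=
  if h : last > 0 ∧ PySem.List.pyGet? data last = some 0 then findLastA data (last - 1) else last
termination_by last.toNat
decreasing_by obtain ⟨h1, -⟩ := h; omega

def find_code_region (data : List Int) : Int × Int :=
  (findFirstA data 0, findLastA data ((data.length : Int) - 1) + 1)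

-- ===== PORT B =====
-- loop body: if b != 0 and not seen: first = i; seen = True ; if b != 0: last = i
def stepB (st : Int × Bool × Int) (p : Int × Int) : Int × Bool × Int :=
  let (first, seen, last) := st
  let (i, b) := p
  let (first, seen) := if b ≠ 0 ∧ seen = false then (i, true) else (first, seen)
  let last := if b ≠ 0 then i else last
  (first, seen, last)

def find_code_region_alt (data : List Int) : Int × Int :=
  if data = [] then (0, 0)
  else
    let st := (PySem.List.enumerate data 0).foldl stepB (0, false, 0)
    (st.1, st.2.2 + 1)

-- ===== PRECONDITION & SPEC =====
def Spec_find_code_region (data : List Int) (out : Int × Int) : Prop := out = find_code_region_alt data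
instance (data : List Int) (out : Int × Int) : Decidable (Spec_find_code_region data out) := by unfold Spec_find_code_region; infer_instance

-- ===== CLAIM (what is proved, stated in full; the proofs are below) =====
def Claim_equal_find_code_region : Prop := ∀ (data : List Int), Dom_find_code_region data → Spec_find_code_region data (find_code_region data)

-- ===== LEMMAS AND PROOFS =====

-- index of the first non-zero entry, if any
def firstNZ : List Int → Option Int
  | [] => none
  | x :: xs => if x ≠ 0 then some 0 else (firstNZ xs).map (· + 1)

-- index of the last non-zero entry, if any
def lastNZ : List Int → Option Int
  | [] => none
  | x :: xs =>
    match lastNZ xs with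
    | some j => some (j + 1)
    | none => if x ≠ 0 then some 0 else none

theorem findFirstA_eq (l : List Int) : ∀ (i : Int),
    findFirstA l i = match firstNZ l with | some j => i + j | none => 0 := by
  induction l with
  | nil => intro i; simp [findFirstA, firstNZ]
  | cons x xs ih =>
    intro i
    by_cases hx : x = 0
    · simp only [findFirstA, firstNZ, hx]
      rw [ih (i + 1)]
      cases h : firstNZ xs with
      | none => simp
      | some j => simp; ring
    · simp [findFirstA, firstNZ, hx]

theorem lastNZ_append (xs : List Int) (y : Int) :
    lastNZ (xs ++ [y]) = if y ≠ 0 then some (xs.length : Int) else lastNZ xs := by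
  induction xs with
  | nil => by_cases hy : y = 0 <;> simp [lastNZ, hy]
  | cons x xs ih =>
    rw [List.cons_append, lastNZ, ih]
    by_cases hy : y = 0
    · simp [hy, lastNZ]
    · simp [hy]

theorem findLastA_append (xs : List Int) (y : Int) : ∀ (n : Nat), n < xs.length →
    findLastA (xs ++ [y]) (n : Int) = findLastA xs (n : Int) := by
  intro n
  induction n using Nat.strong_induction_on with
  | _ n ih =>
    intro hn
    have hget : PySem.List.pyGet? (xs ++ [y]) (n : Int) = PySem.List.pyGet? xs (n : Int) := by
      rw [PySem.List.pyGet?_natCast, PySem.List.pyGet?_natCast,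
        List.getElem?_append_left hn]
    conv_lhs => rw [findLastA]
    conv_rhs => rw [findLastA]
    rw [hget]
    by_cases hc : (n : Int) > 0 ∧ PySem.List.pyGet? xs (n : Int) = some 0
    · rw [dif_pos hc, dif_pos hc]
      have harg : ((n : Int) - 1) = ((n - 1 : Nat) : Int) := by omega
      rw [harg, ih (n - 1) (by omega) (by omega)]
    · rw [dif_neg hc, dif_neg hc]

theorem findLastA_char (data : List Int) (hne : data ≠ []) :
    findLastA data ((data.length : Int) - 1) =
      match lastNZ data with | some j => j | none => 0 := by
  induction data using List.reverseRecOn with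
  | nil => exact absurd rfl hne
  | append_singleton xs y ih =>
    have hlen : ((xs ++ [y]).length : Int) - 1 = ((xs.length : Nat) : Int) := by simp
    rw [hlen]
    conv_lhs => rw [findLastA]
    have hget : PySem.List.pyGet? (xs ++ [y]) ((xs.length : Nat) : Int) = some y :=
      PySem.List.pyGet?_append_length xs [] y
    rw [lastNZ_append]
    by_cases hy : y = 0
    · subst hy
      rcases List.eq_nil_or_concat' xs with rfl | ⟨zs, z, rfl⟩
      · rw [dif_neg (by simp)]
        simp [lastNZ]
      · have hL : (zs ++ [z]).length = zs.length + 1 := by simp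
        have hpos : (0 : Int) < ((zs ++ [z]).length : Int) := by omega
        rw [dif_pos ⟨hpos, hget⟩]
        have harg : (((zs ++ [z]).length : Nat) : Int) - 1 = (((zs ++ [z]).length - 1 : Nat) : Int) := by
          omega
        rw [harg, findLastA_append _ _ _ (by omega), ← harg, ih (by simp)]
        simp
    · rw [dif_neg (by simp [hy])]
      simp [hy]

theorem foldl_stepB (l : List Int) : ∀ (s0 f : Int) (seen : Bool) (la : Int),
    (PySem.List.enumerate l s0).foldl stepB (f, seen, la) =
      ((if seen then f else match firstNZ l with | some j => s0 + j | none => f),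
       (seen || l.any (· ≠ 0)),
       (match lastNZ l with | some j => s0 + j | none => la)) := by
  induction l with
  | nil => intro s0 f seen la; cases seen <;> simp [firstNZ, lastNZ]
  | cons x xs ih =>
    intro s0 f seen la
    rw [PySem.List.enumerate_cons, List.foldl_cons]
    by_cases hx : x = 0
    · have hstep : stepB (f, seen, la) (s0, x) = (f, seen, la) := by
        simp [stepB, hx]
      rw [hstep, ih]
      cases h : firstNZ xs with
      | none =>
        cases h2 : lastNZ xs with
        | none => simp [firstNZ, lastNZ, hx, h, h2]
        | some j => simp [firstNZ, lastNZ, hx, h, h2]; ring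
      | some j =>
        cases h2 : lastNZ xs with
        | none => simp [firstNZ, lastNZ, hx, h, h2]; cases seen <;> simp; ring
        | some k =>
          simp [firstNZ, lastNZ, hx, h, h2]
          constructor
          · cases seen <;> simp; ring
          · ring
    · cases seen with
      | false =>
        have hstep : stepB (f, false, la) (s0, x) = (s0, true, s0) := by
          simp [stepB, hx]
        rw [hstep, ih]
        cases h2 : lastNZ xs with
        | none => simp [firstNZ, lastNZ, hx, h2]
        | some j => simp [firstNZ, lastNZ, hx, h2]; ring
      | true =>
        have hstep : stepB (f, true, la) (s0, x) = (f, true, s0) := by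
          simp [stepB, hx]
        rw [hstep, ih]
        cases h2 : lastNZ xs with
        | none => simp [lastNZ, hx, h2]
        | some j => simp [lastNZ, hx, h2]; ring

-- ===== VERDICT (by name: the statement is the Claim_ definition above) =====
theorem find_code_region_spec : Claim_equal_find_code_region := by
  intro data _
  unfold Spec_find_code_region find_code_region find_code_region_alt
  by_cases hne : data = []
  · subst hne
    simp [findFirstA]
    rw [findLastA]
    norm_num
  · rw [if_neg hne]
    rw [foldl_stepB data 0 0 false 0]
    rw [findFirstA_eq data 0, findLastA_char data hne]
    cases h1 : firstNZ data <;> cases h2 : lastNZ data <;> simp
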